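-- pv_equiv track=rewrite | github.com/jayacharan4/births-jupyter | births_usa.py | calc_counts
-- ===== SOURCE A (Python) =====
-- def calc_counts(data,column):
--     dictionary=dict()
--     if column=="year":
--          column=0
--     if column=="month":
--         column=1
--     if column=="date_of_month":
--         column=2
--     if column=="day_of_week":
--         column=3
--     for each in data:
--         column_data=each[column]
--         births=each[4]
--         if column_data in dictionary:
--             dictionary[column_data]=dictionary[column_data]+births
--         else:
--             dictionary[column_data]=births
--     return dictionary
-- ===== SOURCE B (Python) =====
-- def calc_counts(data, column):
--     idx = {"year": 0, "month": 1, "date_of_month": 2, "day_of_week": 3}.get(column)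
--     keys = list(dict.fromkeys(row[idx] for row in data))
--     return {k: sum(row[4] for row in data if row[idx] == k) for k in keys}
-- ===== Notes on version B (the rewrite author's own statement) =====
-- stated objective: alternative
-- what changed: Replaces A's single hash-accumulation loop by a group-by decomposition: collect the distinct column values in first-occurrence order (dict.fromkeys), then build the result with one per-key sum comprehension over the data.
import Mathlib
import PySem

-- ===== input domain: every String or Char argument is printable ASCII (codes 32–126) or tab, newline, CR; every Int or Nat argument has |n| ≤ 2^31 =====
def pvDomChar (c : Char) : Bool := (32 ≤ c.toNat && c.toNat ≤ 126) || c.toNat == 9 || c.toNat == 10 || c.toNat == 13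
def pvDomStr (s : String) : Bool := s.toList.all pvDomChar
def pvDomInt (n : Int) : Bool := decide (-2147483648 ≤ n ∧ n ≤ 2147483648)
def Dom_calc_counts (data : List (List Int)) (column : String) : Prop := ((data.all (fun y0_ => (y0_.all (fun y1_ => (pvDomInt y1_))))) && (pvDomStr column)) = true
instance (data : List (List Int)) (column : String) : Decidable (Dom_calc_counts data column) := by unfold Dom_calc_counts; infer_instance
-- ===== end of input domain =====

-- B replaces A's single hash-accumulation loop by a group-by decomposition (ordered
-- distinct keys via dict.fromkeys, then one per-key sum comprehension); same result, no speed claim.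

-- ===== PORT A =====
-- A's sequential 'if' chain: once column is rebound to an int the later string
-- comparisons are all false, so the chain is equivalent to this first-match lookup.
def pvColIdxA (column : String) : Option Int :=
  if column == "year" then some 0
  else if column == "month" then some 1
  else if column == "date_of_month" then some 2
  else if column == "day_of_week" then some 3
  else none

def pvStepA (col : Int) (d : PySem.Dict Int Int) (each : List Int) : PySem.Dict Int Int :=
  match PySem.List.pyGet? each col, PySem.List.pyGet? each 4 with
  | some column_data, some births =>
      if d.contains column_data then
        d.insert column_data (d.getD column_data 0 + births)
      else
        d.insert column_data births
  | _, _ => d  -- IndexError in Python; excluded by Pre_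

def calc_counts (data : List (List Int)) (column : String) : List (Int × Int) :=
  match pvColIdxA column with
  | some col => (data.foldl (pvStepA col) PySem.Dict.empty).items
  | none => []  -- Python raises TypeError (string index); excluded by Pre_

-- ===== PORT B =====
def calc_counts_alt (data : List (List Int)) (column : String) : List (Int × Int) :=
  match (PySem.Dict.ofList [("year", (0 : Int)), ("month", 1), ("date_of_month", 2), ("day_of_week", 3)]).get? column with
  | none => []  -- idx is None, Python raises TypeError; excluded by Pre_
  | some idx =>
      let keys := PySem.List.dedup (data.map (fun row => (PySem.List.pyGet? row idx).getD 0))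
      keys.map (fun k => (k,
        ((data.filter (fun row => (PySem.List.pyGet? row idx).getD 0 == k)).map
          (fun row => (PySem.List.pyGet? row 4).getD 0)).sum))

-- ===== PRECONDITION & SPEC =====
-- Pre_ admits exactly the inputs on which the Python A returns: a recognized column
-- name (otherwise indexing with a string raises TypeError — except on empty data, where
-- the loop never runs) and every row of length ≥ 5 (otherwise IndexError).
def Pre_calc_counts (data : List (List Int)) (column : String) : Prop :=
  (column = "year" ∨ column = "month" ∨ column = "date_of_month" ∨ column = "day_of_week" ∨ data = []) ∧
  ∀ row ∈ data, 5 ≤ row.length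
instance (data : List (List Int)) (column : String) : Decidable (Pre_calc_counts data column) := by
  unfold Pre_calc_counts; infer_instance

def pvWitness_calc_counts : List (List Int) × String :=
  ([[2000, 1, 1, 5, 10], [2000, 2, 1, 6, 20], [2001, 1, 2, 0, 7]], "year")

def Spec_calc_counts (data : List (List Int)) (column : String) (out : List (Int × Int)) : Prop := out = calc_counts_alt data column
instance (data : List (List Int)) (column : String) (out : List (Int × Int)) : Decidable (Spec_calc_counts data column out) := by unfold Spec_calc_counts; infer_instance

-- ===== CLAIM (what is proved, stated in full; the proofs are below) =====
def Claim_equal_calc_counts : Prop := ∀ (data : List (List Int)) (column : String), Dom_calc_counts data column → Pre_calc_counts data column → Spec_calc_counts data column (calc_counts data column)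

-- ===== LEMMAS AND PROOFS =====

-- In-range indexing is defined (and equals its default-stripped value).
lemma pyGet?_in_range (r : List Int) (i : Int) (h0 : 0 ≤ i) (h : i < r.length) :
    PySem.List.pyGet? r i = some ((PySem.List.pyGet? r i).getD 0) := by
  have hi : PySem.List.pyIdx? r.length i = some i.toNat := by
    simp [PySem.List.pyIdx?, h0, h]
  simp [PySem.List.pyGet?, hi, List.getElem?_eq_getElem (show i.toNat < r.length by omega)]

-- On a row of length ≥ 5, A's loop body is a uniform insert-accumulate step.
lemma stepA_eq (idx : Int) (h0 : 0 ≤ idx) (h5 : idx < 5) (d : PySem.Dict Int Int)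
    (row : List Int) (hlen : 5 ≤ row.length) :
    pvStepA idx d row =
      d.insert ((PySem.List.pyGet? row idx).getD 0)
        (d.getD ((PySem.List.pyGet? row idx).getD 0) 0 + (PySem.List.pyGet? row 4).getD 0) := by
  have hk := pyGet?_in_range row idx h0 (by omega)
  have hb := pyGet?_in_range row 4 (by omega) (by exact_mod_cast by omega)
  unfold pvStepA
  rw [hk, hb]
  by_cases hc : d.contains ((PySem.List.pyGet? row idx).getD 0) = true
  · simp [hc]
  · simp only [Bool.not_eq_true] at hc
    simp [hc, PySem.Dict.getD_of_not_contains d 0 hc]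

-- Value computed by the accumulate fold: the start value plus the per-key sum.
lemma foldl_getD (kf bf : List Int → Int) (l : List (List Int)) (d : PySem.Dict Int Int) (v : Int) :
    (l.foldl (fun d row => d.insert (kf row) (d.getD (kf row) 0 + bf row)) d).getD v 0
      = d.getD v 0 + ((l.filter (fun row => kf row == v)).map bf).sum := by
  induction l generalizing d with
  | nil => simp
  | cons a l ih =>
      simp only [List.foldl_cons, ih, List.filter_cons]
      by_cases h : kf a = v
      · subst h; simp [PySem.Dict.getD_insert_self]; ring
      · simp [PySem.Dict.getD_insert_of_ne d _ _ (show v ≠ kf a from fun hh => h hh.symm), h]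

-- A's finished dict, as an items list, is B's group-by result.
lemma fold_items (idx : Int) (h0 : 0 ≤ idx) (h5 : idx < 5) (data : List (List Int))
    (hlen : ∀ row ∈ data, 5 ≤ row.length) :
    (data.foldl (pvStepA idx) PySem.Dict.empty).items =
      (PySem.List.dedup (data.map (fun row => (PySem.List.pyGet? row idx).getD 0))).map
        (fun k => (k, ((data.filter (fun row => (PySem.List.pyGet? row idx).getD 0 == k)).map
          (fun row => (PySem.List.pyGet? row 4).getD 0)).sum)) := by
  have hcong : data.foldl (pvStepA idx) PySem.Dict.empty
      = data.foldl (fun d row => d.insert ((PySem.List.pyGet? row idx).getD 0)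
          (d.getD ((PySem.List.pyGet? row idx).getD 0) 0 + (PySem.List.pyGet? row 4).getD 0))
          PySem.Dict.empty := by
    apply PySem.List.foldl_congr_mem
    intro d row hrow
    exact stepA_eq idx h0 h5 d row (hlen row hrow)
  rw [hcong]
  have hnd : (data.foldl (fun d row => d.insert ((PySem.List.pyGet? row idx).getD 0)
      (d.getD ((PySem.List.pyGet? row idx).getD 0) 0 + (PySem.List.pyGet? row 4).getD 0))
      PySem.Dict.empty).keys.Nodup :=
    PySem.Dict.nodup_keys_foldl_insert_key data _ _ PySem.Dict.empty PySem.Dict.nodup_keys_empty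
  rw [PySem.Dict.items_eq_map_keys _ hnd 0]
  rw [PySem.Dict.keys_foldl_insert_key]
  simp only [PySem.Dict.keys_empty, PySem.Set.update_nil_left, ← PySem.List.dedup_eq_ofList]
  apply List.map_congr_left
  intro k _
  rw [foldl_getD (fun row => (PySem.List.pyGet? row idx).getD 0)
      (fun row => (PySem.List.pyGet? row 4).getD 0) data PySem.Dict.empty k]
  simp [PySem.Dict.getD_empty]

-- ===== VERDICT (by name: the statement is the Claim_ definition above) =====
theorem calc_counts_spec : Claim_equal_calc_counts := by
  intro data column _ hpre
  obtain ⟨hcol, hlen⟩ := hpre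
  unfold Spec_calc_counts calc_counts calc_counts_alt
  by_cases hnil : data = []
  · -- empty data: both sides are the empty dict whatever the column is
    subst hnil
    cases pvColIdxA column <;>
      cases (PySem.Dict.ofList [("year", (0 : Int)), ("month", 1), ("date_of_month", 2), ("day_of_week", 3)]).get? column <;>
        simp [PySem.Dict.empty]
  · rcases hcol with rfl | rfl | rfl | rfl | h
    all_goals first
      | exact absurd h hnil
      | · simp only [pvColIdxA, String.reduceBEq, if_true,
            PySem.Dict.ofList, PySem.Dict.get?]
          exact fold_items _ (by norm_num) (by norm_num) data hlen
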